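-- pv_equiv track=rewrite | github.com/yaswanth8008/DSA | Math/8. Very Large Number (A^B!)%P.py | solve
-- ===== SOURCE A (Python) =====
-- def solve(A, B):
--     m = 10**9+7
--     def fact(n,m):
--         f = 1
--         for i in range(1,n+1):
--             f = (f%m*i%m)%m
--         return f
--
--     def pow(a,b,c):
--         if b == 0:
--             return 1
--         p = pow(a,b//2,c)
--         if b%2 == 0:
--             return (p*p)%c
--         else:
--             return(a*p*p)%c
--     x = fact(B,m-1)
--     return pow(A,x,m)
-- ===== SOURCE B (Python) =====
-- def solve(A, B):
--     m = 10**9 + 7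
--     e = 1
--     for i in range(1, B + 1):
--         e = e * i % (m - 1)
--     result = 1
--     base = A % m
--     while e:
--         if e & 1:
--             result = result * base % m
--         base = base * base % m
--         e >>= 1
--     return result
-- ===== Notes on version B (the rewrite author's own statement) =====
-- stated objective: alternative
-- what changed: The recursive halve-then-combine square-and-multiply pow is replaced by an iterative low-bit-first binary-exponentiation loop (result/base/shift state), and the factorial is a plain running product mod m-1 without A's redundant inner reductions.
import Mathlib
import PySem

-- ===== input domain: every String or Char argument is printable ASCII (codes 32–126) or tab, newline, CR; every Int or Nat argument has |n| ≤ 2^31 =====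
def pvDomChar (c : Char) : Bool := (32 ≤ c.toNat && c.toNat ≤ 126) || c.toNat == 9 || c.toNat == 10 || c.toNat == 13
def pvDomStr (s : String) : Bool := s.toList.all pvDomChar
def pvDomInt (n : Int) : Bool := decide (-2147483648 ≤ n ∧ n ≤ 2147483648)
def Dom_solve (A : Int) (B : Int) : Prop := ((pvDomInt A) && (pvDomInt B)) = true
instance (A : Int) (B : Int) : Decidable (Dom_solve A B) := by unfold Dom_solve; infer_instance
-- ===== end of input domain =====

-- B replaces A's recursive square-and-multiply with an iterative low-bit-first binary-exponentiation
-- loop and drops the redundant inner reductions in the factorial loop (objective: alternative).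

-- ===== PORT A =====
-- fact(n, m): f = 1; for i in range(1, n+1): f = (f%m*i%m)%m; return f
-- (m = 10^9+6 > 0 here, so Python `%` is Int.emod exactly: PySem.Int.mod_eq_emod_of_pos)
def solveFact (n : Int) (m : Int) : Int :=
  (PySem.List.pyRange 1 (n + 1) 1).foldl (fun f i => (f % m * i % m) % m) 1

-- pow(a, b, c), recursive; the sole call site passes b = fact(B, m-1) ∈ [0, 10^9+6),
-- so the Nat exponent is exact (b // 2 = b / 2 and b % 2 on a nonnegative Int).
def solvePow (a : Int) (b : Nat) (c : Int) : Int :=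
  if h : b = 0 then 1
  else
    let p := solvePow a (b / 2) c
    if b % 2 = 0 then (p * p) % c else (a * p * p) % c
termination_by b
decreasing_by exact Nat.div_lt_self (Nat.pos_of_ne_zero h) one_lt_two

def solve (A : Int) (B : Int) : Int :=
  let m : Int := 10 ^ 9 + 7
  let x := solveFact B (m - 1)
  solvePow A x.toNat m

-- ===== PORT B =====
-- while e: if e & 1: result = result*base % m; base = base*base % m; e >>= 1
-- (e starts at the factorial value ∈ [0, 10^9+6), so the Nat exponent is exact;
--  e & 1 is e % 2 and e >>= 1 is e / 2 on a nonnegative Int; m > 0 so `%` is Int.emod)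
def binLoop (res base : Int) (e : Nat) (c : Int) : Int :=
  if h : e = 0 then res
  else binLoop (if e % 2 = 1 then res * base % c else res) (base * base % c) (e / 2) c
termination_by e
decreasing_by exact Nat.div_lt_self (Nat.pos_of_ne_zero h) one_lt_two

def solve_alt (A : Int) (B : Int) : Int :=
  let m : Int := 10 ^ 9 + 7
  let e := (PySem.List.pyRange 1 (B + 1) 1).foldl (fun e i => e * i % (m - 1)) 1
  binLoop 1 (A % m) e.toNat m

-- ===== PRECONDITION & SPEC =====
def Spec_solve (A : Int) (B : Int) (out : Int) : Prop := out = solve_alt A B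
instance (A : Int) (B : Int) (out : Int) : Decidable (Spec_solve A B out) := by unfold Spec_solve; infer_instance

-- ===== CLAIM (what is proved, stated in full; the proofs are below) =====
def Claim_equal_solve : Prop := ∀ (A : Int) (B : Int), Dom_solve A B → Spec_solve A B (solve A B)

-- ===== LEMMAS AND PROOFS =====

-- the two factorial folds agree and stay in [0, K)
lemma fact_folds (K : Int) (hK : 0 < K) (l : List Int) :
    ∀ f : Int, 0 ≤ f → f < K →
      l.foldl (fun f i => (f % K * i % K) % K) f = l.foldl (fun e i => e * i % K) f
      ∧ 0 ≤ l.foldl (fun e i => e * i % K) f ∧ l.foldl (fun e i => e * i % K) f < K := by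
  induction l with
  | nil => intro f h0 h1; exact ⟨rfl, h0, h1⟩
  | cons i l ih =>
      intro f h0 h1
      simp only [List.foldl_cons]
      have hf : f % K = f := Int.emod_eq_of_lt h0 h1
      have hmm : f * i % K % K = f * i % K := Int.emod_emod_of_dvd _ dvd_rfl
      rw [hf, hmm]
      exact ih _ (Int.emod_nonneg _ (by omega)) (Int.emod_lt_of_pos _ hK)

lemma solvePow_correct (a c : Int) :
    ∀ b : Nat, 0 < b → solvePow a b c = a ^ b % c := by
  intro b
  induction b using Nat.strong_induction_on with
  | _ b ih =>
    intro hb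
    rw [solvePow]
    simp only [Nat.pos_iff_ne_zero.mp hb, dite_false]
    have hm : a ^ (b / 2) % c ≡ a ^ (b / 2) [ZMOD c] := Int.emod_emod_of_dvd _ dvd_rfl
    by_cases h2 : b / 2 = 0
    · have hb1 : b = 1 := by omega
      subst hb1
      show (if 1 % 2 = 0 then solvePow a (1 / 2) c * solvePow a (1 / 2) c
            else a * solvePow a (1 / 2) c * solvePow a (1 / 2) c) % c = a ^ 1 % c
      rw [show (1 : Nat) / 2 = 0 from rfl, solvePow]
      norm_num
    · rw [ih (b / 2) (Nat.div_lt_self hb one_lt_two) (Nat.pos_of_ne_zero h2)]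
      by_cases he : b % 2 = 0
      · have hb2 : a ^ (b / 2) * a ^ (b / 2) = a ^ b := by
          rw [← pow_add]; congr 1; omega
        simp only [he, if_true]
        exact hb2 ▸ hm.mul hm
      · have hb2 : a * a ^ (b / 2) * a ^ (b / 2) = a ^ b := by
          rw [mul_assoc, ← pow_add, ← pow_succ']; congr 1; omega
        simp only [he, if_false]
        exact hb2 ▸ ((Int.ModEq.refl a).mul hm).mul hm

lemma binLoop_correct (c : Int) :
    ∀ (e : Nat) (res base : Int), 0 < e → binLoop res base e c = res * base ^ e % c := by
  intro e
  induction e using Nat.strong_induction_on with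
  | _ e ih =>
    intro res base he
    rw [binLoop]
    simp only [Nat.pos_iff_ne_zero.mp he, dite_false]
    by_cases h2 : e / 2 = 0
    · have he1 : e = 1 := by omega
      subst he1
      rw [show (1 : Nat) / 2 = 0 from rfl, binLoop]
      norm_num
    · rw [ih (e / 2) (Nat.div_lt_self he one_lt_two) _ _ (Nat.pos_of_ne_zero h2)]
      have hbb : base * base % c ≡ base * base [ZMOD c] := Int.emod_emod_of_dvd _ dvd_rfl
      have hb : (base * base % c) ^ (e / 2) ≡ (base * base) ^ (e / 2) [ZMOD c] :=
        hbb.pow (e / 2)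
      by_cases ho : e % 2 = 1
      · have he2 : res * base * (base * base) ^ (e / 2) = res * base ^ e := by
          have h3 : e = 2 * (e / 2) + 1 := by omega
          conv_rhs => rw [h3]
          rw [← pow_two, ← pow_mul, pow_succ]; ring
        simp only [ho, if_true]
        have hr : res * base % c ≡ res * base [ZMOD c] := Int.emod_emod_of_dvd _ dvd_rfl
        exact he2 ▸ hr.mul hb
      · have he2 : res * (base * base) ^ (e / 2) = res * base ^ e := by
          have h3 : e = 2 * (e / 2) := by omega
          conv_rhs => rw [h3]
          rw [← pow_two, ← pow_mul]
        simp only [ho, if_false]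
        exact he2 ▸ ((Int.ModEq.refl res).mul hb)

-- ===== VERDICT (by name: the statement is the Claim_ definition above) =====
theorem solve_spec : Claim_equal_solve := by
  intro A B _
  unfold Spec_solve solve solve_alt solveFact
  simp only [show (10 : Int) ^ 9 + 7 - 1 = 10 ^ 9 + 6 by norm_num]
  obtain ⟨heq, h0, _⟩ := fact_folds (10 ^ 9 + 6) (by norm_num)
      (PySem.List.pyRange 1 (B + 1) 1) 1 (by norm_num) (by norm_num)
  rw [heq]
  set x := (PySem.List.pyRange 1 (B + 1) 1).foldl (fun e i => e * i % (10 ^ 9 + 6)) 1 with hx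
  by_cases hz : x.toNat = 0
  · rw [hz, solvePow, binLoop]; simp
  · rw [solvePow_correct A _ _ (Nat.pos_of_ne_zero hz),
        binLoop_correct _ _ _ _ (Nat.pos_of_ne_zero hz), one_mul]
    have hA : A % (10 ^ 9 + 7) ≡ A [ZMOD (10 ^ 9 + 7)] := Int.emod_emod_of_dvd A dvd_rfl
    exact (hA.pow x.toNat).symm
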